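-- pv_equiv track=rewrite | github.com/ResearchDataset/AAAI2025-Dataset | scripts/utils/partition.py | greedy_partition
-- ===== SOURCE A (Python) =====
-- def partition_score(partition, judgments):
--     set_index = {}
--     for idx, group in enumerate(partition):
--         for node in group:
--             set_index[node] = idx
--     score = 0
--     for (i, j), answer in judgments.items():
--         if answer == 'Yes':
--             if set_index[i] == set_index[j]:
--                 score += 1
--         elif answer == 'No' or answer == 'Not sure':
--             if set_index[i] != set_index[j]:
--                 score += 1
--     return score
--
-- def greedy_partition(items, judgments):
--     clusters = [{item} for item in items]
--     def score_for_merge(c1, c2):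
--         merged = c1 | c2
--         score_delta = 0
--         for (i, j), answer in judgments.items():
--             if (i in c1 and j in c2) or (i in c2 and j in c1):
--                 if answer == 'Yes':
--                     score_delta += 1
--                 elif answer == 'No' or answer == 'Not sure':
--                     score_delta -= 1
--         return score_delta
--     improved = True
--     while improved:
--         improved = False
--         best_increase = 0
--         best_pair = None
--         for i in range(len(clusters)):
--             for j in range(i+1, len(clusters)):
--                 delta = score_for_merge(clusters[i], clusters[j])
--                 if delta > best_increase:
--                     best_increase = delta
--                     best_pair = (i, j)
--         if best_pair:
--             i, j = best_pair
--             clusters[i] = clusters[i] | clusters[j]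
--             del clusters[j]
--             improved = True
--     overall_score = partition_score(clusters, judgments)
--     return clusters, overall_score
-- ===== SOURCE B (Python) =====
-- # B: per-round one-pass aggregation of cross-cluster deltas into a dict + incremental score, instead of rescanning all judgments per cluster pair and rescoring at the end
-- def greedy_partition(items, judgments):
--     clusters = [{item} for item in items]
--     score = 0
--     for (i, j), answer in judgments.items():
--         if answer == 'Yes':
--             if i == j:
--                 score += 1
--         elif answer == 'No' or answer == 'Not sure':
--             if i != j:
--                 score += 1
--     while True:
--         idx = {}
--         for k, group in enumerate(clusters):
--             for node in group:
--                 idx[node] = k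
--         deltas = {}
--         for (i, j), answer in judgments.items():
--             w = 1 if answer == 'Yes' else (-1 if answer == 'No' or answer == 'Not sure' else 0)
--             if w != 0:
--                 a, b = idx[i], idx[j]
--                 if a != b:
--                     key = (a, b) if a < b else (b, a)
--                     deltas[key] = deltas.get(key, 0) + w
--         best_increase = 0
--         best_pair = None
--         for i in range(len(clusters)):
--             for j in range(i + 1, len(clusters)):
--                 d = deltas.get((i, j), 0)
--                 if d > best_increase:
--                     best_increase = d
--                     best_pair = (i, j)
--         if best_pair is None:
--             break
--         i, j = best_pair
--         clusters[i] = clusters[i] | clusters[j]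
--         del clusters[j]
--         score += best_increase
--     return clusters, score
-- ===== Notes on version B (the rewrite author's own statement) =====
-- stated objective: faster
-- what changed: Instead of rescanning all judgments for every cluster pair in every round (score_for_merge) and rescoring the final partition from scratch, B builds a node-to-cluster index once per round, aggregates all cross-cluster merge deltas in a single pass over the judgments into a dict keyed by cluster-index pairs, reads that dict in the pair-selection loop, and obtains the final score incrementally as the all-singletons score plus the accepted deltas.
-- outside the precondition, e.g. on greedy_partition([1, 1], {(1, 1): 'Yes'}): A returns ([{1}], 1), B returns ([{1}, {1}], 1)
import Mathlib
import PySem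

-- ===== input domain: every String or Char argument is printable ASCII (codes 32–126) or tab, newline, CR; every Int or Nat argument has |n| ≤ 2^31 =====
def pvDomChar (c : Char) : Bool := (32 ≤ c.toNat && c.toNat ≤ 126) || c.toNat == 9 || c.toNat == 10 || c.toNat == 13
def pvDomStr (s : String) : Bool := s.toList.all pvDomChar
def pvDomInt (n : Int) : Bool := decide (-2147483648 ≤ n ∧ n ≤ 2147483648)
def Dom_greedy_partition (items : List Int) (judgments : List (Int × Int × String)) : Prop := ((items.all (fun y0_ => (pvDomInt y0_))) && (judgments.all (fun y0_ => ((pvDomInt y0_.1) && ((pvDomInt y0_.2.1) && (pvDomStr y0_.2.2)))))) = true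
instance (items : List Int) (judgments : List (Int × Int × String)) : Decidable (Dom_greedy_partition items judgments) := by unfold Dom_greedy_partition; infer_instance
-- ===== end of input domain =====

-- B replaces A's per-pair rescan of all judgments by one per-round aggregation pass over the
-- judgments into a dict of cross-cluster deltas (objective: faster; return value only — no
-- argument is mutated observably by either version).

-- ===== PORT A =====
-- a Python set of ints is PySem.Set Int (a List Int with distinct elements)

-- def score_for_merge(c1, c2) closed over judgments (a dict, iterated as an association list)
def scoreForMergeA (judgments : List (Int × Int × String)) (c1 c2 : PySem.Set Int) : Int :=
  judgments.foldl (fun score_delta e =>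
    if (PySem.Set.contains c1 e.1 && PySem.Set.contains c2 e.2.1)
       || (PySem.Set.contains c2 e.1 && PySem.Set.contains c1 e.2.1) then
      if e.2.2 == "Yes" then score_delta + 1
      else if e.2.2 == "No" || e.2.2 == "Not sure" then score_delta - 1
      else score_delta
    else score_delta) 0

-- the double loop 'for i in range(len) / for j in range(i+1, len)' picking the best pair
def findBestA (judgments : List (Int × Int × String)) (clusters : List (PySem.Set Int)) :
    Int × Option (Nat × Nat) :=
  (List.range clusters.length).foldl (fun st i =>
    (List.range' (i + 1) (clusters.length - (i + 1))).foldl (fun st j =>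
      let delta := scoreForMergeA judgments (clusters.getD i []) (clusters.getD j [])
      if delta > st.1 then (delta, some (i, j)) else st) st) (0, none)

-- clusters[i] = clusters[i] | clusters[j]; del clusters[j]
def mergeAtA (clusters : List (PySem.Set Int)) (i j : Nat) : List (PySem.Set Int) :=
  (clusters.set i (PySem.Set.union (clusters.getD i []) (clusters.getD j []))).eraseIdx j

-- the while-improved loop; fuel = number of clusters bounds the rounds (each merge removes one
-- cluster and a merge needs two, so the fuel is never exhausted before best_pair is None)
def loopA (judgments : List (Int × Int × String)) :
    Nat → List (PySem.Set Int) → List (PySem.Set Int)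
  | 0, clusters => clusters
  | fuel + 1, clusters =>
    match (findBestA judgments clusters).2 with
    | none => clusters
    | some (i, j) => loopA judgments fuel (mergeAtA clusters i j)

-- set_index built by the enumerate loop of partition_score
def setIndexA (partition : List (PySem.Set Int)) : PySem.Dict Int Int :=
  (PySem.List.enumerate partition).foldl
    (fun d p => p.2.foldl (fun d node => d.insert node p.1) d) PySem.Dict.empty

-- def partition_score(partition, judgments); Python raises KeyError on a judgment endpoint not in
-- the partition — excluded by Pre_; the distinct defaults -1/-2 keep the two lookups unequal there
def partitionScoreA (partition : List (PySem.Set Int)) (judgments : List (Int × Int × String)) : Int :=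
  let set_index := setIndexA partition
  judgments.foldl (fun score e =>
    if e.2.2 == "Yes" then
      (if set_index.getD e.1 (-1) == set_index.getD e.2.1 (-2) then score + 1 else score)
    else if e.2.2 == "No" || e.2.2 == "Not sure" then
      (if set_index.getD e.1 (-1) != set_index.getD e.2.1 (-2) then score + 1 else score)
    else score) 0

def greedy_partition (items : List Int) (judgments : List (Int × Int × String)) :
    List (List Int) × Int :=
  let clusters := items.map (fun item => [item])   -- [{item} for item in items]
  let final := loopA judgments items.length clusters
  (final, partitionScoreA final judgments)

-- ===== PORT B =====
-- idx = {node: k for k, group in enumerate(clusters) for node in group}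
def buildIdxB (clusters : List (PySem.Set Int)) : PySem.Dict Int Int :=
  (PySem.List.enumerate clusters).foldl
    (fun d p => p.2.foldl (fun d node => d.insert node p.1) d) PySem.Dict.empty

-- one pass over the judgments aggregating cross-cluster deltas keyed by the (smaller, larger)
-- cluster-index pair; Python raises KeyError on an endpoint missing from idx — excluded by Pre_
def deltasB (judgments : List (Int × Int × String)) (idx : PySem.Dict Int Int) :
    PySem.Dict (Int × Int) Int :=
  judgments.foldl (fun d e =>
    let w : Int := if e.2.2 == "Yes" then 1
                   else if e.2.2 == "No" || e.2.2 == "Not sure" then -1 else 0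
    if w != 0 then
      let a := idx.getD e.1 (-1)
      let b := idx.getD e.2.1 (-2)
      if a != b then
        let key := if a < b then (a, b) else (b, a)
        d.insert key (d.getD key 0 + w)
      else d
    else d) PySem.Dict.empty

-- the selection double loop, now a dict lookup instead of a scan of the judgments
def findBestB (deltas : PySem.Dict (Int × Int) Int) (len : Nat) : Int × Option (Nat × Nat) :=
  (List.range len).foldl (fun st (i : Nat) =>
    (List.range' (i + 1) (len - (i + 1))).foldl (fun st (j : Nat) =>
      let d := deltas.getD (((i : Nat) : Int), ((j : Nat) : Int)) 0
      if d > st.1 then (d, some (i, j)) else st) st) (0, none)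

def mergeAtB (clusters : List (PySem.Set Int)) (i j : Nat) : List (PySem.Set Int) :=
  (clusters.set i (PySem.Set.union (clusters.getD i []) (clusters.getD j []))).eraseIdx j

-- the loop also carries the running score: each accepted merge adds its best_increase
def loopB (judgments : List (Int × Int × String)) :
    Nat → List (PySem.Set Int) → Int → List (List Int) × Int
  | 0, clusters, score => (clusters, score)
  | fuel + 1, clusters, score =>
    let idx := buildIdxB clusters
    let deltas := deltasB judgments idx
    let best := findBestB deltas clusters.length
    match best.2 with
    | none => (clusters, score)
    | some (i, j) => loopB judgments fuel (mergeAtB clusters i j) (score + best.1)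

-- the score of the all-singletons start: a judgment is satisfied iff 'Yes' on a self-pair or
-- 'No'/'Not sure' on a pair of two different items (no cluster index needed at all)
def initScoreB (judgments : List (Int × Int × String)) : Int :=
  judgments.foldl (fun score e =>
    if e.2.2 == "Yes" then (if e.1 == e.2.1 then score + 1 else score)
    else if e.2.2 == "No" || e.2.2 == "Not sure" then
      (if e.1 != e.2.1 then score + 1 else score)
    else score) 0

def greedy_partition_alt (items : List Int) (judgments : List (Int × Int × String)) :
    List (List Int) × Int :=
  loopB judgments items.length (items.map (fun item => [item])) (initScoreB judgments)

-- ===== PRECONDITION & SPEC =====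
-- Pre_ excludes: duplicate judgment keys (such an association list has no Python-dict
-- counterpart: dict construction collapses them before either function runs); endpoints of a
-- 'Yes'/'No'/'Not sure' judgment that are missing from items (count 0: Python A raises KeyError
-- in partition_score, B's idx lookup raises too) or duplicated in items (count > 1: the node then
-- starts in two clusters at once, and A's set-membership double counting on such non-partitions
-- is an accident of representation that no node-to-cluster index can express).
def Pre_greedy_partition (items : List Int) (judgments : List (Int × Int × String)) : Prop :=
  (judgments.map (fun e => (e.1, e.2.1))).Nodup ∧
    ∀ e ∈ judgments, (e.2.2 = "Yes" ∨ e.2.2 = "No" ∨ e.2.2 = "Not sure") →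
      items.count e.1 = 1 ∧ items.count e.2.1 = 1

instance (items : List Int) (judgments : List (Int × Int × String)) :
    Decidable (Pre_greedy_partition items judgments) := by
  unfold Pre_greedy_partition; infer_instance

def pvWitness_greedy_partition : List Int × (List (Int × Int × String)) :=
  ([1, 2, 3], [(1, 2, "Yes"), (2, 3, "No"), (1, 3, "Not sure")])

def Spec_greedy_partition (items : List Int) (judgments : List (Int × Int × String)) (out : List (List Int) × Int) : Prop := out = greedy_partition_alt items judgments
instance (items : List Int) (judgments : List (Int × Int × String)) (out : List (List Int) × Int) : Decidable (Spec_greedy_partition items judgments out) := by unfold Spec_greedy_partition; infer_instance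

-- ===== CLAIM (what is proved, stated in full; the proofs are below) =====
def Claim_equal_greedy_partition : Prop := ∀ (items : List Int) (judgments : List (Int × Int × String)), Dom_greedy_partition items judgments → Pre_greedy_partition items judgments → Spec_greedy_partition items judgments (greedy_partition items judgments)

-- ===== LEMMAS AND PROOFS =====

-- a judgment is relevant iff its answer is scored at all
def RelJ (e : Int × Int × String) : Prop :=
  e.2.2 = "Yes" ∨ e.2.2 = "No" ∨ e.2.2 = "Not sure"

-- the nodes whose cluster membership can influence either program
def PEnd (judgments : List (Int × Int × String)) (n : Int) : Prop :=
  ∃ e ∈ judgments, RelJ e ∧ (n = e.1 ∨ n = e.2.1)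

-- invariants carried through the merge loop: relevant endpoints lie in at most one cluster,
-- and every relevant endpoint lies in some cluster
def DisjCl (judgments : List (Int × Int × String)) (cl : List (List Int)) : Prop :=
  ∀ a b : Nat, a < b → b < cl.length → ∀ n : Int, PEnd judgments n →
    n ∈ cl.getD a [] → n ∉ cl.getD b []

def CovCl (judgments : List (Int × Int × String)) (cl : List (List Int)) : Prop :=
  ∀ e ∈ judgments, RelJ e → (∃ k, k < cl.length ∧ e.1 ∈ cl.getD k []) ∧
    (∃ k, k < cl.length ∧ e.2.1 ∈ cl.getD k [])

lemma get?_insertAll (c : List Int) (v : Int) (d : PySem.Dict Int Int) (n : Int) :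
    (c.foldl (fun d x => d.insert x v) d).get? n = if n ∈ c then some v else d.get? n := by
  induction c generalizing d with
  | nil => simp
  | cons x t ih =>
    simp only [List.foldl_cons, ih, List.mem_cons]
    by_cases hxt : n ∈ t
    · simp [hxt]
    · by_cases hx : n = x
      · subst hx; simp [hxt, PySem.Dict.get?_insert_self]
      · simp [hxt, hx, PySem.Dict.get?_insert_of_ne d v hx]

lemma get?_idxFold_not_mem (cl : List (List Int)) (s : Int) (d : PySem.Dict Int Int) (n : Int)
    (h : ∀ g ∈ cl, n ∉ g) :
    ((PySem.List.enumerate cl s).foldl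
      (fun d p => p.2.foldl (fun d node => d.insert node p.1) d) d).get? n = d.get? n := by
  induction cl generalizing s d with
  | nil => simp [PySem.List.enumerate]
  | cons c t ih =>
    rw [PySem.List.enumerate_cons]
    simp only [List.foldl_cons]
    rw [ih (s + 1) _ (fun g hg => h g (by simp [hg])), get?_insertAll]
    simp [h c (by simp)]

lemma get?_idxFold_mem (cl : List (List Int)) (s : Int) (d : PySem.Dict Int Int) (n : Int)
    (k : Nat) (hk : k < cl.length) (hmem : n ∈ cl.getD k [])
    (hlater : ∀ k', k < k' → k' < cl.length → n ∉ cl.getD k' []) :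
    ((PySem.List.enumerate cl s).foldl
      (fun d p => p.2.foldl (fun d node => d.insert node p.1) d) d).get? n
      = some (s + (k : Int)) := by
  induction cl generalizing s d k with
  | nil => simp at hk
  | cons c t ih =>
    rw [PySem.List.enumerate_cons]
    simp only [List.foldl_cons]
    cases k with
    | zero =>
      have hnt : ∀ g ∈ t, n ∉ g := by
        intro g hg
        obtain ⟨k', hk', hg'⟩ := List.mem_iff_getElem.mp hg
        have h5 := hlater (k' + 1) (Nat.succ_pos _) (by simpa using Nat.succ_lt_succ hk')
        rw [List.getD_cons_succ, List.getD_eq_getElem t [] hk', hg'] at h5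
        exact h5
      rw [get?_idxFold_not_mem t _ _ _ hnt, get?_insertAll]
      simp only [List.getD_cons_zero] at hmem
      simp [hmem]
    | succ k =>
      have hrec := ih (s + 1) (c.foldl (fun d node => d.insert node s) d) k
        (by simpa using hk) (by simpa using hmem)
        (by
          intro k' h1 h2
          have := hlater (k' + 1) (by omega) (by simpa using Nat.succ_lt_succ h2)
          simpa using this)
      rw [hrec]
      congr 1
      push_cast
      ring

lemma idx_get?_of_mem (judg : List (Int × Int × String)) (cl : List (List Int))
    (hd : DisjCl judg cl) (k : Nat) (hk : k < cl.length)
    (n : Int) (hP : PEnd judg n) (hmem : n ∈ cl.getD k []) :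
    (buildIdxB cl).get? n = some (k : Int) := by
  have := get?_idxFold_mem cl 0 PySem.Dict.empty n k hk hmem
    (fun k' h1 h2 => hd k k' h1 h2 n hP hmem)
  simpa using this

lemma mem_getD_iff (judg : List (Int × Int × String)) (cl : List (List Int))
    (hd : DisjCl judg cl) {k a : Nat} (hk : k < cl.length)
    (ha : a < cl.length) {n : Int} (hP : PEnd judg n) (hmem : n ∈ cl.getD k []) :
    n ∈ cl.getD a [] ↔ a = k := by
  constructor
  · intro h
    by_contra hne
    rcases Nat.lt_or_ge a k with h1 | h1
    · exact hd a k h1 hk n hP h hmem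
    · exact hd k a (by omega) ha n hP hmem h
  · rintro rfl; exact hmem

-- one step of the aggregation fold shifts the value at a fixed key by a per-judgment contribution
lemma getD_foldl_shift {α : Type} (js : List α)
    (stepB : PySem.Dict (Int × Int) Int → α → PySem.Dict (Int × Int) Int)
    (c : α → Int) (key : Int × Int)
    (h : ∀ e ∈ js, ∀ d : PySem.Dict (Int × Int) Int,
      (stepB d e).getD key 0 = d.getD key 0 + c e) :
    ∀ d : PySem.Dict (Int × Int) Int,
      (js.foldl stepB d).getD key 0 = d.getD key 0 + (js.map c).sum := by
  induction js with
  | nil => simp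
  | cons e js ih =>
    intro d
    simp only [List.foldl_cons, List.map_cons, List.sum_cons]
    rw [ih (fun e' he' => h e' (by simp [he'])) (stepB d e), h e (by simp) d]
    ring

-- the aggregated delta at key (x, y) IS A\'s rescanned score_for_merge of that cluster pair
lemma deltasB_getD (judg : List (Int × Int × String)) (cl : List (List Int))
    (hd : DisjCl judg cl) (hcov : CovCl judg cl) (x y : Nat) (hxy : x < y)
    (hy : y < cl.length) :
    (deltasB judg (buildIdxB cl)).getD ((x : Int), (y : Int)) 0
      = scoreForMergeA judg (cl.getD x []) (cl.getD y []) := by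
  have hx : x < cl.length := lt_trans hxy hy
  set cA : (Int × Int × String) → Int := fun e =>
    if (PySem.Set.contains (cl.getD x []) e.1 && PySem.Set.contains (cl.getD y []) e.2.1)
       || (PySem.Set.contains (cl.getD y []) e.1 && PySem.Set.contains (cl.getD x []) e.2.1) then
      (if e.2.2 == "Yes" then 1 else if e.2.2 == "No" || e.2.2 == "Not sure" then -1 else 0)
    else 0 with hcA
  have hA : scoreForMergeA judg (cl.getD x []) (cl.getD y []) = (judg.map cA).sum := by
    unfold scoreForMergeA
    rw [PySem.List.foldl_congr_mem _ _ (fun acc e => acc + cA e) 0 ?_]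
    · rw [PySem.List.foldl_add]; simp
    · intro acc e _
      simp only [hcA]
      split_ifs <;> ring
  have hB : ∀ e ∈ judg, ∀ d : PySem.Dict (Int × Int) Int,
      ((fun d (e : Int × Int × String) =>
        let w : Int := if e.2.2 == "Yes" then 1
                       else if e.2.2 == "No" || e.2.2 == "Not sure" then -1 else 0
        if w != 0 then
          let a := (buildIdxB cl).getD e.1 (-1)
          let b := (buildIdxB cl).getD e.2.1 (-2)
          if a != b then
            let key := if a < b then (a, b) else (b, a)
            d.insert key (d.getD key 0 + w)
          else d
        else d) d e).getD ((x : Int), (y : Int)) 0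
        = d.getD ((x : Int), (y : Int)) 0 + cA e := by
    intro e he d
    by_cases hrel : RelJ e
    swap
    · simp only [RelJ, not_or] at hrel
      obtain ⟨r1, r2, r3⟩ := hrel
      simp [hcA, r1, r2, r3]
    obtain ⟨⟨ki, hki, hmi⟩, ⟨kj, hkj, hmj⟩⟩ := hcov e he hrel
    have hP1 : PEnd judg e.1 := ⟨e, he, hrel, Or.inl rfl⟩
    have hP2 : PEnd judg e.2.1 := ⟨e, he, hrel, Or.inr rfl⟩
    have hgi : (buildIdxB cl).getD e.1 (-1) = (ki : Int) :=
      PySem.Dict.getD_of_get?_eq_some _ _ (idx_get?_of_mem judg cl hd ki hki e.1 hP1 hmi)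
    have hgj : (buildIdxB cl).getD e.2.1 (-2) = (kj : Int) :=
      PySem.Dict.getD_of_get?_eq_some _ _ (idx_get?_of_mem judg cl hd kj hkj e.2.1 hP2 hmj)
    have m1 : e.1 ∈ cl.getD x [] ↔ x = ki := mem_getD_iff judg cl hd hki hx hP1 hmi
    have m2 : e.1 ∈ cl.getD y [] ↔ y = ki := mem_getD_iff judg cl hd hki hy hP1 hmi
    have m3 : e.2.1 ∈ cl.getD x [] ↔ x = kj := mem_getD_iff judg cl hd hkj hx hP2 hmj
    have m4 : e.2.1 ∈ cl.getD y [] ↔ y = kj := mem_getD_iff judg cl hd hkj hy hP2 hmj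
    simp only [hgi, hgj, hcA]
    set w : Int := if e.2.2 == "Yes" then 1
                   else if e.2.2 == "No" || e.2.2 == "Not sure" then -1 else 0 with hw
    by_cases hw0 : w = 0
    · simp [hw0]
    · simp only [bne_iff_ne, ne_eq, hw0, not_false_eq_true, if_true, ite_not]
      have e1 : PySem.Set.contains (cl.getD x []) e.1 = decide (x = ki) := by
        simp [PySem.Set.contains]; simpa using m1
      have e2 : PySem.Set.contains (cl.getD y []) e.2.1 = decide (y = kj) := by
        simp [PySem.Set.contains]; simpa using m4
      have e3 : PySem.Set.contains (cl.getD y []) e.1 = decide (y = ki) := by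
        simp [PySem.Set.contains]; simpa using m2
      have e4 : PySem.Set.contains (cl.getD x []) e.2.1 = decide (x = kj) := by
        simp [PySem.Set.contains]; simpa using m3
      rw [e1, e2, e3, e4]
      by_cases hkk : ki = kj
      · rw [if_pos (by exact_mod_cast hkk : ((ki : Nat) : Int) = ((kj : Nat) : Int))]
        have hcf : (decide (x = ki) && decide (y = kj) || decide (y = ki) && decide (x = kj))
            = false := by subst hkk; simp; omega
        rw [hcf]; simp
      · rw [if_neg (fun hcc => hkk (by exact_mod_cast hcc : ki = kj))]
        by_cases hlt : ki < kj
        · rw [if_pos (by exact_mod_cast hlt : ((ki : Nat) : Int) < ((kj : Nat) : Int))]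
          by_cases hxk : x = ki ∧ y = kj
          · obtain ⟨rfl, rfl⟩ := hxk
            simp [PySem.Dict.getD_insert_self]
          · have hne : (((x : Nat) : Int), ((y : Nat) : Int)) ≠ (((ki : Nat) : Int), ((kj : Nat) : Int)) := by
              simp only [ne_eq, Prod.mk.injEq, Nat.cast_inj]; tauto
            rw [PySem.Dict.getD_insert, if_neg hne]
            have hcf : (decide (x = ki) && decide (y = kj) || decide (y = ki) && decide (x = kj))
                = false := by simp; omega
            rw [hcf]; simp
        · rw [if_neg (fun hcc => hlt (by exact_mod_cast hcc : ki < kj))]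
          by_cases hxk : x = kj ∧ y = ki
          · obtain ⟨rfl, rfl⟩ := hxk
            simp [PySem.Dict.getD_insert_self]
          · have hne : (((x : Nat) : Int), ((y : Nat) : Int)) ≠ (((kj : Nat) : Int), ((ki : Nat) : Int)) := by
              simp only [ne_eq, Prod.mk.injEq, Nat.cast_inj]; tauto
            rw [PySem.Dict.getD_insert, if_neg hne]
            have hcf : (decide (x = ki) && decide (y = kj) || decide (y = ki) && decide (x = kj))
                = false := by simp; omega
            rw [hcf]; simp
  have := getD_foldl_shift judg _ cA ((x : Int), (y : Int)) hB PySem.Dict.empty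
  unfold deltasB
  rw [this, hA]
  simp

lemma findBestA_bounds (judg : List (Int × Int × String)) (cl : List (List Int)) :
    ∀ i j, (findBestA judg cl).2 = some (i, j) → i < j ∧ j < cl.length := by
  unfold findBestA
  apply List.foldlRecOn (motive := fun st : Int × Option (Nat × Nat) =>
    ∀ i j, st.2 = some (i, j) → i < j ∧ j < cl.length)
  · intro i j h; simp at h
  · intro st hst a ha
    apply List.foldlRecOn (motive := fun st : Int × Option (Nat × Nat) =>
      ∀ i j, st.2 = some (i, j) → i < j ∧ j < cl.length)
    · exact hst
    · intro st' hst' b hb i j h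
      have ha' : a < cl.length := List.mem_range.mp ha
      have hb' := List.mem_range'_1.mp hb
      by_cases hc : scoreForMergeA judg (cl.getD a []) (cl.getD b []) > st'.1
      · simp only [hc, if_true] at h
        simp only [Option.some.injEq, Prod.mk.injEq] at h
        obtain ⟨rfl, rfl⟩ := h
        omega
      · simp only [hc, if_false] at h
        exact hst' i j h

lemma findBest_eq (judg : List (Int × Int × String)) (cl : List (List Int))
    (hd : DisjCl judg cl) (hcov : CovCl judg cl) :
    findBestA judg cl = findBestB (deltasB judg (buildIdxB cl)) cl.length := by
  unfold findBestA findBestB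
  refine PySem.List.foldl_congr_mem _ _ _ _ ?_
  intro acc i hi
  refine PySem.List.foldl_congr_mem _ _ _ _ ?_
  intro acc' j hj
  have hi' : i < cl.length := List.mem_range.mp hi
  have hj' := List.mem_range'_1.mp hj
  have hjlt : j < cl.length := by omega
  have hij : i < j := by omega
  simp only [deltasB_getD judg cl hd hcov i j hij hjlt]

lemma length_mergeAtA (cl : List (List Int)) (i j : Nat) (hj : j < cl.length) :
    (mergeAtA cl i j).length = cl.length - 1 := by
  unfold mergeAtA
  rw [List.length_eraseIdx]
  simp [hj]

lemma getD_mergeAtA (cl : List (List Int)) (i j a : Nat) (hij : i < j) (hj : j < cl.length)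
    (ha : a < cl.length - 1) :
    (mergeAtA cl i j).getD a []
      = if a = i then PySem.Set.union (cl.getD i []) (cl.getD j [])
        else if a < j then cl.getD a [] else cl.getD (a + 1) [] := by
  unfold mergeAtA
  have hlen : ((cl.set i (PySem.Set.union (cl.getD i []) (cl.getD j []))).eraseIdx j).length
      = cl.length - 1 := by
    rw [List.length_eraseIdx]; simp [hj]
  have h1 : a < ((cl.set i (PySem.Set.union (cl.getD i []) (cl.getD j []))).eraseIdx j).length := by
    omega
  rw [List.getD_eq_getElem _ _ h1, List.getElem_eraseIdx]
  split
  case isTrue haj =>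
    rw [List.getElem_set]
    by_cases hai : i = a
    · rw [if_pos hai, if_pos hai.symm]
    · rw [if_neg hai, if_neg (fun hh => hai hh.symm)]
      rw [List.getD_eq_getElem _ _ (by omega : a < cl.length)]
  case isFalse haj =>
    rw [List.getElem_set]
    rw [if_neg (by omega : ¬ i = a + 1), if_neg (by omega : ¬ a = i)]
    rw [List.getD_eq_getElem _ _ (by omega : a + 1 < cl.length)]

lemma disj_merge (judg : List (Int × Int × String)) (cl : List (List Int)) (i j : Nat)
    (hd : DisjCl judg cl) (hij : i < j)
    (hj : j < cl.length) : DisjCl judg (mergeAtA cl i j) := by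
  intro a b hab hb n hP hna hnb
  have hne : ∀ p q : Nat, p ≠ q → p < cl.length → q < cl.length →
      n ∈ cl.getD p [] → n ∉ cl.getD q [] := by
    intro p q hpq hp hq hnp
    rcases Nat.lt_or_ge p q with h1 | h1
    · exact hd p q h1 hq n hP hnp
    · intro hnq; exact hd q p (by omega) hp n hP hnq hnp
  rw [length_mergeAtA cl i j hj] at hb
  rw [getD_mergeAtA cl i j a hij hj (by omega)] at hna
  rw [getD_mergeAtA cl i j b hij hj hb] at hnb
  by_cases hai : a = i
  · have hbne : b ≠ i := by omega
    rw [if_neg hbne] at hnb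
    rw [if_pos hai] at hna
    rcases (PySem.Set.mem_union _ _ n).mp hna with h | h
    · split_ifs at hnb with hbj
      · exact hne i b (by omega) (by omega) (by omega) h hnb
      · exact hne i (b + 1) (by omega) (by omega) (by omega) h hnb
    · split_ifs at hnb with hbj
      · exact hne j b (by omega) (by omega) (by omega) h hnb
      · exact hne j (b + 1) (by omega) (by omega) (by omega) h hnb
  · rw [if_neg hai] at hna
    by_cases hbi : b = i
    · rw [if_pos hbi] at hnb
      rcases (PySem.Set.mem_union _ _ n).mp hnb with h | h
      · split_ifs at hna with haj
        · exact hne a i (by omega) (by omega) (by omega) hna h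
        · exact hne (a + 1) i (by omega) (by omega) (by omega) hna h
      · split_ifs at hna with haj
        · exact hne a j (by omega) (by omega) (by omega) hna h
        · exact hne (a + 1) j (by omega) (by omega) (by omega) hna h
    · rw [if_neg hbi] at hnb
      split_ifs at hna with haj <;> split_ifs at hnb with hbj
      · exact hne a b (by omega) (by omega) (by omega) hna hnb
      · exact hne a (b + 1) (by omega) (by omega) (by omega) hna hnb
      · omega
      · exact hne (a + 1) (b + 1) (by omega) (by omega) (by omega) hna hnb

lemma cov_merge (judg : List (Int × Int × String)) (cl : List (List Int)) (i j : Nat)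
    (hcov : CovCl judg cl) (hij : i < j) (hj : j < cl.length) :
    CovCl judg (mergeAtA cl i j) := by
  have key : ∀ n : Int, (∃ k, k < cl.length ∧ n ∈ cl.getD k []) →
      ∃ k, k < (mergeAtA cl i j).length ∧ n ∈ (mergeAtA cl i j).getD k [] := by
    intro n ⟨k, hk, hmem⟩
    rw [length_mergeAtA cl i j hj]
    by_cases hki : k = i
    · refine ⟨i, by omega, ?_⟩
      rw [getD_mergeAtA cl i j i hij hj (by omega), if_pos rfl]
      exact (PySem.Set.mem_union _ _ n).mpr (Or.inl (hki ▸ hmem))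
    · by_cases hkj : k = j
      · refine ⟨i, by omega, ?_⟩
        rw [getD_mergeAtA cl i j i hij hj (by omega), if_pos rfl]
        exact (PySem.Set.mem_union _ _ n).mpr (Or.inr (hkj ▸ hmem))
      · by_cases hklt : k < j
        · refine ⟨k, by omega, ?_⟩
          rw [getD_mergeAtA cl i j k hij hj (by omega), if_neg hki, if_pos hklt]
          exact hmem
        · refine ⟨k - 1, by omega, ?_⟩
          rw [getD_mergeAtA cl i j (k - 1) hij hj (by omega), if_neg (by omega : k - 1 ≠ i),
            if_neg (by omega : ¬ k - 1 < j)]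
          have : k - 1 + 1 = k := by omega
          rw [this]
          exact hmem
  intro e he hrel
  obtain ⟨h1, h2⟩ := hcov e he hrel
  exact ⟨key e.1 h1, key e.2.1 h2⟩

lemma findBestA_value (judg : List (Int × Int × String)) (cl : List (List Int)) :
    ∀ i j, (findBestA judg cl).2 = some (i, j) →
      (findBestA judg cl).1 = scoreForMergeA judg (cl.getD i []) (cl.getD j []) := by
  unfold findBestA
  apply List.foldlRecOn (motive := fun st : Int × Option (Nat × Nat) =>
    ∀ i j, st.2 = some (i, j) → st.1 = scoreForMergeA judg (cl.getD i []) (cl.getD j []))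
  · intro i j h; simp at h
  · intro st hst a _
    apply List.foldlRecOn (motive := fun st : Int × Option (Nat × Nat) =>
      ∀ i j, st.2 = some (i, j) → st.1 = scoreForMergeA judg (cl.getD i []) (cl.getD j []))
    · exact hst
    · intro st' hst' b _ i j h
      by_cases hc : scoreForMergeA judg (cl.getD a []) (cl.getD b []) > st'.1
      · simp only [hc, if_true] at h ⊢
        simp only [Option.some.injEq, Prod.mk.injEq] at h
        obtain ⟨rfl, rfl⟩ := h
        rfl
      · simp only [hc, if_false] at h ⊢
        exact hst' i j h

lemma setIndexA_eq_buildIdxB : setIndexA = buildIdxB := rfl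

lemma partitionScoreA_eq_sum (cl : List (List Int)) (judg : List (Int × Int × String)) :
    partitionScoreA cl judg = (judg.map (fun e =>
      if e.2.2 == "Yes" then
        (if (setIndexA cl).getD e.1 (-1) == (setIndexA cl).getD e.2.1 (-2) then (1 : Int) else 0)
      else if e.2.2 == "No" || e.2.2 == "Not sure" then
        (if (setIndexA cl).getD e.1 (-1) != (setIndexA cl).getD e.2.1 (-2) then (1 : Int) else 0)
      else 0)).sum := by
  simp only [partitionScoreA]
  rw [PySem.List.foldl_congr_mem _ _ (fun acc e => acc +
    (if e.2.2 == "Yes" then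
      (if (setIndexA cl).getD e.1 (-1) == (setIndexA cl).getD e.2.1 (-2) then (1 : Int) else 0)
    else if e.2.2 == "No" || e.2.2 == "Not sure" then
      (if (setIndexA cl).getD e.1 (-1) != (setIndexA cl).getD e.2.1 (-2) then (1 : Int) else 0)
    else 0)) 0 (by intro acc e _; split_ifs <;> simp_all)]
  rw [PySem.List.foldl_add]
  simp

lemma scoreForMergeA_eq_sum (judg : List (Int × Int × String)) (c1 c2 : PySem.Set Int) :
    scoreForMergeA judg c1 c2 = (judg.map (fun e =>
      if (PySem.Set.contains c1 e.1 && PySem.Set.contains c2 e.2.1)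
         || (PySem.Set.contains c2 e.1 && PySem.Set.contains c1 e.2.1) then
        (if e.2.2 == "Yes" then (1 : Int)
         else if e.2.2 == "No" || e.2.2 == "Not sure" then -1 else 0)
      else 0)).sum := by
  unfold scoreForMergeA
  rw [PySem.List.foldl_congr_mem _ _ (fun acc e => acc +
    (if (PySem.Set.contains c1 e.1 && PySem.Set.contains c2 e.2.1)
       || (PySem.Set.contains c2 e.1 && PySem.Set.contains c1 e.2.1) then
      (if e.2.2 == "Yes" then (1 : Int)
       else if e.2.2 == "No" || e.2.2 == "Not sure" then -1 else 0)
    else 0)) 0 (by intro acc e _; split_ifs <;> simp_all <;> try ring)]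
  rw [PySem.List.foldl_add]
  simp

-- the merged position of old cluster k after merging cluster j into cluster i (i < j)
def phiIdx (i j k : Nat) : Nat := if k = j then i else if k < j then k else k - 1

lemma phiIdx_eq_iff (i j p q len : Nat) (hij : i < j) (_hj : j < len) (_hp : p < len)
    (_hq : q < len) : phiIdx i j p = phiIdx i j q ↔
      (p = q ∨ (p = i ∧ q = j) ∨ (p = j ∧ q = i)) := by
  unfold phiIdx
  split_ifs <;> omega

lemma phiIdx_lt (i j k len : Nat) (hij : i < j) (hj : j < len) (hk : k < len) :
    phiIdx i j k < len - 1 := by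
  unfold phiIdx
  split_ifs <;> omega

lemma mem_merge_phi (cl : List (List Int)) (i j k : Nat) (hij : i < j) (hj : j < cl.length)
    (hk : k < cl.length) (n : Int) (hmem : n ∈ cl.getD k []) :
    n ∈ (mergeAtA cl i j).getD (phiIdx i j k) [] := by
  unfold phiIdx
  by_cases h1 : k = j
  · rw [if_pos h1, getD_mergeAtA cl i j i hij hj (by omega), if_pos rfl]
    exact (PySem.Set.mem_union _ _ n).mpr (Or.inr (h1 ▸ hmem))
  · rw [if_neg h1]
    by_cases h2 : k < j
    · rw [if_pos h2, getD_mergeAtA cl i j k hij hj (by omega)]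
      by_cases hki : k = i
      · rw [if_pos hki]
        exact (PySem.Set.mem_union _ _ n).mpr (Or.inl (hki ▸ hmem))
      · rw [if_neg hki, if_pos h2]; exact hmem
    · rw [if_neg h2, getD_mergeAtA cl i j (k - 1) hij hj (by omega),
        if_neg (by omega : ¬ k - 1 = i), if_neg (by omega : ¬ k - 1 < j)]
      have hsk : k - 1 + 1 = k := by omega
      rw [hsk]; exact hmem

-- score additivity: merging a pair shifts the partition score by exactly score_for_merge
lemma score_merge (judg : List (Int × Int × String)) (cl : List (List Int)) (i j : Nat)
    (hd : DisjCl judg cl) (hcov : CovCl judg cl) (hij : i < j) (hj : j < cl.length) :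
    partitionScoreA (mergeAtA cl i j) judg
      = partitionScoreA cl judg + scoreForMergeA judg (cl.getD i []) (cl.getD j []) := by
  rw [partitionScoreA_eq_sum, partitionScoreA_eq_sum, scoreForMergeA_eq_sum]
  rw [← PySem.List.sum_map_add_int]
  apply congrArg
  apply List.map_congr_left
  intro e he
  by_cases hrel : RelJ e
  swap
  · simp only [RelJ, not_or] at hrel
    obtain ⟨r1, r2, r3⟩ := hrel
    simp [r1, r2, r3]
  obtain ⟨⟨ki, hki, hmi⟩, ⟨kj, hkj, hmj⟩⟩ := hcov e he hrel
  have hP1 : PEnd judg e.1 := ⟨e, he, hrel, Or.inl rfl⟩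
  have hP2 : PEnd judg e.2.1 := ⟨e, he, hrel, Or.inr rfl⟩
  have hi' : i < cl.length := by omega
  have hgi : (setIndexA cl).getD e.1 (-1) = (ki : Int) := by
    rw [setIndexA_eq_buildIdxB]
    exact PySem.Dict.getD_of_get?_eq_some _ _ (idx_get?_of_mem judg cl hd ki hki e.1 hP1 hmi)
  have hgj : (setIndexA cl).getD e.2.1 (-2) = (kj : Int) := by
    rw [setIndexA_eq_buildIdxB]
    exact PySem.Dict.getD_of_get?_eq_some _ _ (idx_get?_of_mem judg cl hd kj hkj e.2.1 hP2 hmj)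
  have hd' := disj_merge judg cl i j hd hij hj
  have hgi' : (setIndexA (mergeAtA cl i j)).getD e.1 (-1) = (phiIdx i j ki : Int) := by
    rw [setIndexA_eq_buildIdxB]
    refine PySem.Dict.getD_of_get?_eq_some _ _ (idx_get?_of_mem judg (mergeAtA cl i j) hd'
      (phiIdx i j ki) ?_ e.1 hP1 (mem_merge_phi cl i j ki hij hj hki e.1 hmi))
    rw [length_mergeAtA cl i j hj]
    exact phiIdx_lt i j ki cl.length hij hj hki
  have hgj' : (setIndexA (mergeAtA cl i j)).getD e.2.1 (-2) = (phiIdx i j kj : Int) := by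
    rw [setIndexA_eq_buildIdxB]
    refine PySem.Dict.getD_of_get?_eq_some _ _ (idx_get?_of_mem judg (mergeAtA cl i j) hd'
      (phiIdx i j kj) ?_ e.2.1 hP2 (mem_merge_phi cl i j kj hij hj hkj e.2.1 hmj))
    rw [length_mergeAtA cl i j hj]
    exact phiIdx_lt i j kj cl.length hij hj hkj
  have ci1 : PySem.Set.contains (cl.getD i []) e.1 = decide (i = ki) := by
    simp [PySem.Set.contains]; simpa using mem_getD_iff judg cl hd hki hi' hP1 hmi
  have cj1 : PySem.Set.contains (cl.getD j []) e.1 = decide (j = ki) := by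
    simp [PySem.Set.contains]; simpa using mem_getD_iff judg cl hd hki hj hP1 hmi
  have ci2 : PySem.Set.contains (cl.getD i []) e.2.1 = decide (i = kj) := by
    simp [PySem.Set.contains]; simpa using mem_getD_iff judg cl hd hkj hi' hP2 hmj
  have cj2 : PySem.Set.contains (cl.getD j []) e.2.1 = decide (j = kj) := by
    simp [PySem.Set.contains]; simpa using mem_getD_iff judg cl hd hkj hj hP2 hmj
  have hpe : (phiIdx i j ki = phiIdx i j kj) ↔
      (ki = kj ∨ (ki = i ∧ kj = j) ∨ (ki = j ∧ kj = i)) :=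
    phiIdx_eq_iff i j ki kj cl.length hij hj hki hkj
  rw [hgi, hgj, hgi', hgj', ci1, cj1, ci2, cj2]
  simp only [beq_iff_eq, bne_iff_ne, ne_eq, Nat.cast_inj, Bool.or_eq_true, Bool.and_eq_true,
    decide_eq_true_eq, hpe]
  split_ifs <;> omega

lemma loop_eq (judg : List (Int × Int × String)) :
    ∀ (fuel : Nat) (cl : List (List Int)) (s : Int), DisjCl judg cl → CovCl judg cl →
      loopB judg fuel cl s
        = (loopA judg fuel cl,
           s + partitionScoreA (loopA judg fuel cl) judg - partitionScoreA cl judg) := by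
  intro fuel
  induction fuel with
  | zero =>
    intro cl s _ _
    show (cl, s) = (cl, s + partitionScoreA cl judg - partitionScoreA cl judg)
    rw [Prod.mk.injEq]
    exact ⟨rfl, by ring⟩
  | succ fuel ih =>
    intro cl s hd hcov
    show (match (findBestB (deltasB judg (buildIdxB cl)) cl.length).2 with
          | none => (cl, s)
          | some (i, j) => loopB judg fuel (mergeAtB cl i j)
              (s + (findBestB (deltasB judg (buildIdxB cl)) cl.length).1)) = _
    rw [← findBest_eq judg cl hd hcov]
    rcases hfb : (findBestA judg cl).2 with _ | ⟨i, j⟩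
    · have hA : loopA judg (fuel + 1) cl = cl := by
        show (match (findBestA judg cl).2 with
              | none => cl
              | some (i, j) => loopA judg fuel (mergeAtA cl i j)) = cl
        rw [hfb]
      rw [hA, Prod.mk.injEq]
      exact ⟨rfl, by ring⟩
    · have hA : loopA judg (fuel + 1) cl = loopA judg fuel (mergeAtA cl i j) := by
        show (match (findBestA judg cl).2 with
              | none => cl
              | some (i, j) => loopA judg fuel (mergeAtA cl i j)) = _
        rw [hfb]
      obtain ⟨hij, hj⟩ := findBestA_bounds judg cl i j hfb
      have hval := findBestA_value judg cl i j hfb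
      rw [hA]
      show loopB judg fuel (mergeAtA cl i j) (s + (findBestA judg cl).1) = _
      rw [ih (mergeAtA cl i j) (s + (findBestA judg cl).1)
        (disj_merge judg cl i j hd hij hj) (cov_merge judg cl i j hcov hij hj)]
      rw [hval, score_merge judg cl i j hd hcov hij hj, Prod.mk.injEq]
      exact ⟨rfl, by ring⟩

lemma two_le_count_of_two_getElem (l : List Int) (a b : Nat) (hab : a < b) (hb : b < l.length)
    (n : Int) (ha' : l[a]'(lt_trans hab hb) = n) (hb' : l[b]'hb = n) : 2 ≤ l.count n := by
  have h1 : n ∈ l.take (a + 1) := by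
    have hlt : a < (l.take (a + 1)).length := by simp; omega
    have : (l.take (a + 1))[a]'hlt = n := by rw [List.getElem_take]; exact ha'
    exact this ▸ List.getElem_mem hlt
  have h2 : n ∈ l.drop (a + 1) := by
    have hlt : b - (a + 1) < (l.drop (a + 1)).length := by simp; omega
    have : (l.drop (a + 1))[b - (a + 1)]'hlt = n := by
      rw [List.getElem_drop]
      have : a + 1 + (b - (a + 1)) = b := by omega
      simp_rw [this]
      exact hb'
    exact this ▸ List.getElem_mem hlt
  have hc1 : 1 ≤ (l.take (a + 1)).count n := List.one_le_count_iff.mpr h1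
  have hc2 : 1 ≤ (l.drop (a + 1)).count n := List.one_le_count_iff.mpr h2
  have : l.count n = (l.take (a + 1)).count n + (l.drop (a + 1)).count n := by
    rw [← List.count_append, List.take_append_drop]
  omega

lemma disj_init (items : List Int) (judg : List (Int × Int × String))
    (hcnt : ∀ n : Int, PEnd judg n → items.count n = 1) :
    DisjCl judg (items.map fun item => [item]) := by
  intro a b hab hb n hP hna hnb
  rw [List.length_map] at hb
  have ha : a < items.length := by omega
  rw [List.getD_eq_getElem _ _ (by simpa using ha), List.getElem_map] at hna
  rw [List.getD_eq_getElem _ _ (by simpa using hb), List.getElem_map] at hnb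
  simp only [List.mem_singleton] at hna hnb
  have := two_le_count_of_two_getElem items a b hab hb n hna.symm hnb.symm
  have := hcnt n hP
  omega

lemma cov_init (items : List Int) (judg : List (Int × Int × String))
    (hends : ∀ e ∈ judg, RelJ e → e.1 ∈ items ∧ e.2.1 ∈ items) :
    CovCl judg (items.map fun item => [item]) := by
  have key : ∀ n : Int, n ∈ items →
      ∃ k, k < (items.map fun item => [item]).length ∧
        n ∈ (items.map fun item => [item]).getD k [] := by
    intro n hn
    obtain ⟨k, hk, hkeq⟩ := List.mem_iff_getElem.mp hn
    refine ⟨k, by simpa using hk, ?_⟩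
    rw [List.getD_eq_getElem _ _ (by simpa using hk), List.getElem_map]
    simp [hkeq]
  intro e he hrel
  exact ⟨key e.1 (hends e he hrel).1, key e.2.1 (hends e he hrel).2⟩

-- the start score needs no cluster index: singleton clusters coincide iff the items coincide
lemma initScore_eq (items : List Int) (judg : List (Int × Int × String))
    (hcnt : ∀ n : Int, PEnd judg n → items.count n = 1)
    (hends : ∀ e ∈ judg, RelJ e → e.1 ∈ items ∧ e.2.1 ∈ items) :
    initScoreB judg = partitionScoreA (items.map fun item => [item]) judg := by
  have hd0 := disj_init items judg hcnt
  have hcov0 := cov_init items judg hends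
  unfold initScoreB
  simp only [partitionScoreA]
  refine PySem.List.foldl_congr_mem _ _ _ 0 ?_
  intro acc e he
  by_cases hrel : RelJ e
  swap
  · simp only [RelJ, not_or] at hrel
    obtain ⟨r1, r2, r3⟩ := hrel
    simp [r1, r2, r3]
  obtain ⟨⟨ki, hki, hmi⟩, ⟨kj, hkj, hmj⟩⟩ := hcov0 e he hrel
  have hP1 : PEnd judg e.1 := ⟨e, he, hrel, Or.inl rfl⟩
  have hP2 : PEnd judg e.2.1 := ⟨e, he, hrel, Or.inr rfl⟩
  have hgi : (setIndexA (items.map fun item => [item])).getD e.1 (-1) = (ki : Int) := by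
    rw [setIndexA_eq_buildIdxB]
    exact PySem.Dict.getD_of_get?_eq_some _ _
      (idx_get?_of_mem judg _ hd0 ki hki e.1 hP1 hmi)
  have hgj : (setIndexA (items.map fun item => [item])).getD e.2.1 (-2) = (kj : Int) := by
    rw [setIndexA_eq_buildIdxB]
    exact PySem.Dict.getD_of_get?_eq_some _ _
      (idx_get?_of_mem judg _ hd0 kj hkj e.2.1 hP2 hmj)
  have hki' : ki < items.length := by simpa using hki
  have hkj' : kj < items.length := by simpa using hkj
  have hvi : e.1 = items[ki] := by
    rw [List.getD_eq_getElem _ _ (by simpa using hki'), List.getElem_map] at hmi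
    simpa using hmi
  have hvj : e.2.1 = items[kj] := by
    rw [List.getD_eq_getElem _ _ (by simpa using hkj'), List.getElem_map] at hmj
    simpa using hmj
  have hcond : (e.1 == e.2.1)
      = ((setIndexA (items.map fun item => [item])).getD e.1 (-1)
         == (setIndexA (items.map fun item => [item])).getD e.2.1 (-2)) := by
    rw [hgi, hgj, Bool.eq_iff_iff]
    simp only [beq_iff_eq, Nat.cast_inj]
    constructor
    · intro hv
      have hm : e.1 ∈ (items.map fun item => [item]).getD kj [] := hv ▸ hmj
      have := (mem_getD_iff judg _ hd0 hki hkj hP1 hmi).mp hm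
      omega
    · intro hv
      subst hv
      rw [hvi, hvj]
  rw [hcond, show (e.1 != e.2.1)
    = ((setIndexA (items.map fun item => [item])).getD e.1 (-1)
       != (setIndexA (items.map fun item => [item])).getD e.2.1 (-2)) from by
      simp only [bne, hcond]]

-- ===== VERDICT (by name: the statement is the Claim_ definition above) =====
theorem greedy_partition_spec : Claim_equal_greedy_partition := by
  intro items judg _ hpre
  obtain ⟨_, hcount⟩ := hpre
  have hcnt : ∀ n : Int, PEnd judg n → items.count n = 1 := by
    rintro n ⟨e, he, hrel, hor⟩
    have h := hcount e he hrel
    rcases hor with h1 | h1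
    · rw [h1]; exact h.1
    · rw [h1]; exact h.2
  have hends : ∀ e ∈ judg, RelJ e → e.1 ∈ items ∧ e.2.1 ∈ items := by
    intro e he hrel
    have h := hcount e he hrel
    exact ⟨List.count_pos_iff.mp (by omega), List.count_pos_iff.mp (by omega)⟩
  unfold Spec_greedy_partition greedy_partition greedy_partition_alt
  have hloop := loop_eq judg items.length (items.map fun item => [item]) (initScoreB judg)
    (disj_init items judg hcnt) (cov_init items judg hends)
  show (loopA judg items.length (items.map fun item => [item]),
        partitionScoreA (loopA judg items.length (items.map fun item => [item])) judg)
      = loopB judg items.length (items.map fun item => [item]) (initScoreB judg)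
  rw [hloop, initScore_eq items judg hcnt hends, Prod.mk.injEq]
  exact ⟨rfl, by ring⟩
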